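-- pv_equiv track=rewrite | github.com/szapf70/codecomp | faw/002_kvb_opendata/loesungen/christian hofmann/kvb_functions.py | find_station_area_with_most_elements
-- ===== SOURCE A (Python) =====
-- def find_station_area_with_most_elements(station_area_ds, key):
--     """
--     Identifies station areas with the most elements for a specified key and returns those areas and the count of elements.
--
--     Arguments:
--         station_area_ds (dict): dictionary containing station area data
--         key (str): key for which to count the elements (e.g., 'Aufzüge', 'Fahrtreppen')
--
--     Returns:
--         tuple: A tuple containing:
--                1. A list of station area identifiers with the most elements for the specified key
--                2. The maximum number of elements found.
--     """
--
--     # initialization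
--     max_key_length = 0
--     max_key = []
--
--     # iterate over each station area in the data structure
--     for station_area_key, station_area in station_area_ds.items():
--         # check if the specified key is present in the station area
--         if station_area.get(key):
--             # get the number of elements for the specified key
--             key_length = len(station_area.get(key))
--
--             # check if the current station area has more elements than the previous maximum
--             if key_length > max_key_length:
--                 # reset the list with the new maximum station area
--                 max_key_length = key_length
--                 max_key = [station_area_key]
--             # if the number of elements is equal to the current maximum, add the station area to the list
--             elif key_length == max_key_length:
--                 max_key.append(station_area_key)
--
--     # return the list of station areas with the most elements and the maximum number of elements
--     return max_key, max_key_length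
-- ===== SOURCE B (Python) =====
-- def find_station_area_with_most_elements(station_area_ds, key):
--     # build a table of (area, count) for areas whose value for `key` is truthy,
--     # then reduce to the max count and filter the tied areas
--     counts = [(k, len(v.get(key))) for k, v in station_area_ds.items() if v.get(key)]
--     m = max((n for _, n in counts), default=0)
--     return [k for k, n in counts if n == m], m
-- ===== Notes on version B (the rewrite author's own statement) =====
-- stated objective: simpler
-- what changed: A's single pass that tracks the running maximum and resets/appends a tie list online is replaced by a three-stage pipeline: build a (area, count) table for the areas whose value for the key is truthy, take the max count with default 0, then filter the tied areas.
import Mathlib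
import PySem

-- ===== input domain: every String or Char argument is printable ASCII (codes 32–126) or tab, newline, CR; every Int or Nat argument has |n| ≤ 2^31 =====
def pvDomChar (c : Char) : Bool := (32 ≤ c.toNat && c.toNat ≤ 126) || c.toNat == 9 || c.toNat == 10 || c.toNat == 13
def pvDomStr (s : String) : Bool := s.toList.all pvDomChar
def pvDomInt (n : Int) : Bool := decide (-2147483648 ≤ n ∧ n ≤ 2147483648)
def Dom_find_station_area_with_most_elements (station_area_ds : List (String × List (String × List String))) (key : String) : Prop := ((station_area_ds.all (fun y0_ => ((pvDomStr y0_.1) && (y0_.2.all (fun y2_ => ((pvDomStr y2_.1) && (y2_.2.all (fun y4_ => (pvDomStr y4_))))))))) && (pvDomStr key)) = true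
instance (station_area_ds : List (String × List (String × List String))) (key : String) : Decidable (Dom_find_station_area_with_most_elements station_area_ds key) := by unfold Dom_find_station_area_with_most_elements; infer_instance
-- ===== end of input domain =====

-- B replaces A's online maximum-tracking loop by a build-counts-table / reduce-to-max / filter-ties pipeline (objective: simpler).

-- ===== PORT A =====
-- A: one pass over the dict items, tracking (max_key list, max_key_length) with reset-on-greater / append-on-equal.
-- `station_area.get(key)` truthiness is ported as `getD key []`: the optional list is truthy iff the lookup hits a nonempty list.
def find_station_area_with_most_elements (station_area_ds : List (String × List (String × List String))) (key : String) : List String × Int :=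
  station_area_ds.foldl
    (fun (acc : List String × Int) p =>
      let v := (PySem.Dict.mk p.2).getD key []
      if v = [] then acc
      else
        let key_length : Int := PySem.List.len v
        if key_length > acc.2 then ([p.1], key_length)
        else if key_length = acc.2 then (acc.1 ++ [p.1], acc.2)
        else acc)
    ([], 0)

-- ===== PORT B =====
-- B: counts table (list comprehension with a truthiness guard), then max with default 0, then filter the ties.
def find_station_area_with_most_elements_alt (station_area_ds : List (String × List (String × List String))) (key : String) : List String × Int :=
  let counts : List (String × Int) :=
    station_area_ds.filterMap (fun p =>
      let v := (PySem.Dict.mk p.2).getD key []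
      if v = [] then none else some (p.1, PySem.List.len v))
  let m : Int := PySem.List.maxD (counts.map (·.2)) id 0
  ((counts.filter (fun q => q.2 == m)).map (·.1), m)

-- ===== PRECONDITION & SPEC =====
def Spec_find_station_area_with_most_elements (station_area_ds : List (String × List (String × List String))) (key : String) (out : List String × Int) : Prop := out = find_station_area_with_most_elements_alt station_area_ds key
instance (station_area_ds : List (String × List (String × List String))) (key : String) (out : List String × Int) : Decidable (Spec_find_station_area_with_most_elements station_area_ds key out) := by unfold Spec_find_station_area_with_most_elements; infer_instance

-- ===== CLAIM (what is proved, stated in full; the proofs are below) =====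
def Claim_equal_find_station_area_with_most_elements : Prop := ∀ (station_area_ds : List (String × List (String × List String))) (key : String), Dom_find_station_area_with_most_elements station_area_ds key → Spec_find_station_area_with_most_elements station_area_ds key (find_station_area_with_most_elements station_area_ds key)

-- ===== LEMMAS AND PROOFS =====

-- A's loop step, named for the proofs (definitionally A's foldl body)
def pvStep (key : String) (acc : List String × Int) (p : String × List (String × List String)) : List String × Int :=
  let v := (PySem.Dict.mk p.2).getD key []
  if v = [] then acc
  else
    let key_length : Int := PySem.List.len v
    if key_length > acc.2 then ([p.1], key_length)
    else if key_length = acc.2 then (acc.1 ++ [p.1], acc.2)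
    else acc

-- B's counts table, named for the proofs (definitionally B's filterMap)
def pvCnts (station_area_ds : List (String × List (String × List String))) (key : String) : List (String × Int) :=
  station_area_ds.filterMap (fun p =>
    let v := (PySem.Dict.mk p.2).getD key []
    if v = [] then none else some (p.1, PySem.List.len v))

-- running maximum of the counts, started at 0 (B's `max(..., default=0)` after pvMaxD_eq_foldl)
def pvM (cs : List (String × Int)) : Int := (cs.map (·.2)).foldl max 0

lemma pvA_eq_foldl (ds : List (String × List (String × List String))) (key : String) :
    find_station_area_with_most_elements ds key = ds.foldl (pvStep key) ([], 0) := rfl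

lemma pvB_eq (ds : List (String × List (String × List String))) (key : String) :
    find_station_area_with_most_elements_alt ds key =
      (((pvCnts ds key).filter (fun q => q.2 == PySem.List.maxD ((pvCnts ds key).map (·.2)) id 0)).map (·.1),
        PySem.List.maxD ((pvCnts ds key).map (·.2)) id 0) := rfl

lemma pvCnts_pos (ds : List (String × List (String × List String))) (key : String) :
    ∀ q ∈ pvCnts ds key, 1 ≤ q.2 := by
  intro q hq
  simp only [pvCnts, List.mem_filterMap] at hq
  obtain ⟨p, _, hp⟩ := hq
  by_cases hv : (PySem.Dict.mk p.2).getD key [] = []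
  · rw [if_pos hv] at hp; cases hp
  · rw [if_neg hv] at hp
    cases hp
    have := List.length_pos_of_ne_nil hv
    simp [PySem.List.len]; omega

lemma pvM_append_singleton (cs : List (String × Int)) (x : String × Int) :
    pvM (cs ++ [x]) = max (pvM cs) x.2 := by
  simp [pvM]

lemma le_pvM (cs : List (String × Int)) : ∀ q ∈ cs, q.2 ≤ pvM cs := by
  intro q hq
  exact (PySem.List.le_foldl_max (cs.map (·.2)) 0).2 q.2 (List.mem_map_of_mem hq)

-- B's `max(…, default=0)` is the running maximum started at 0 when all entries are nonnegative
lemma pvMaxD_eq_foldl (l : List Int) (h : ∀ x ∈ l, 0 ≤ x) :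
    PySem.List.maxD l id 0 = l.foldl max 0 := by
  have key : ∀ (t : List Int) (a : Int),
      PySem.List.max? (a :: t) (id : Int → Int) = some (t.foldl max a) := by
    intro t
    induction t with
    | nil => intro a; rfl
    | cons x t ih =>
      intro a
      have hstep : PySem.List.max? (a :: x :: t) (id : Int → Int)
          = PySem.List.max? (max a x :: t) (id : Int → Int) := by
        simp only [PySem.List.max?, List.foldl_cons]
        congr 1
        change (if id a < id x then some x else some a) = some (max a x)
        simp only [id_eq]
        split_ifs with h'
        · rw [max_eq_right h'.le]
        · rw [max_eq_left (not_lt.mp h')]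
      rw [hstep, ih (max a x), List.foldl_cons]
  cases l with
  | nil => rfl
  | cons x t =>
    have hx : 0 ≤ x := h x (by simp)
    simp only [PySem.List.maxD]
    rw [key t x, Option.getD_some, List.foldl_cons, max_eq_right hx]

-- the step of A's loop, computed on the state a counts table cs determines, appends (a, n) to the table
lemma pvState_step (cs : List (String × Int)) (a : String) (n : Int) :
    (if n > pvM cs then ([a], n)
     else if n = pvM cs then ((cs.filter (fun q => q.2 == pvM cs)).map (·.1) ++ [a], pvM cs)
     else ((cs.filter (fun q => q.2 == pvM cs)).map (·.1), pvM cs))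
    = (((cs ++ [(a, n)]).filter (fun q => q.2 == pvM (cs ++ [(a, n)]))).map (·.1), pvM (cs ++ [(a, n)])) := by
  rw [pvM_append_singleton]
  rcases lt_trichotomy (pvM cs) n with hlt | heq | hgt
  · rw [if_pos hlt, max_eq_right hlt.le]
    have hnone : cs.filter (fun q => q.2 == n) = [] := by
      rw [List.filter_eq_nil_iff]
      intro q hq
      have := le_pvM cs q hq
      simp only [beq_iff_eq]; omega
    simp [List.filter_append, hnone]
  · rw [if_neg (by omega), if_pos heq.symm, max_eq_left heq.ge]
    simp [List.filter_append, heq]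
  · rw [if_neg (by omega), if_neg (by omega), max_eq_left hgt.le]
    have hfalse : (((a, n) : String × Int).2 == pvM cs) = false := by
      simp only [beq_eq_false_iff_ne]; omega
    simp [List.filter_append, hfalse]

-- the loop invariant: A's loop started from the state a counts table cs determines ends in the state the full table determines
lemma pvLoop (key : String) : ∀ (ds : List (String × List (String × List String))) (cs : List (String × Int)),
    ds.foldl (pvStep key) ((cs.filter (fun q => q.2 == pvM cs)).map (·.1), pvM cs)
      = (((cs ++ pvCnts ds key).filter (fun q => q.2 == pvM (cs ++ pvCnts ds key))).map (·.1),
         pvM (cs ++ pvCnts ds key)) := by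
  intro ds
  induction ds with
  | nil => intro cs; simp [pvCnts]
  | cons p ds ih =>
    intro cs
    rw [List.foldl_cons]
    by_cases hv : (PySem.Dict.mk p.2).getD key [] = []
    · have hskip : ∀ acc, pvStep key acc p = acc := by intro acc; simp [pvStep, hv]
      have hc : pvCnts (p :: ds) key = pvCnts ds key := by
        simp only [pvCnts, List.filterMap_cons, if_pos hv]
      rw [hskip, hc, ih cs]
    · have hstep : pvStep key ((cs.filter (fun q => q.2 == pvM cs)).map (·.1), pvM cs) p
          = (if PySem.List.len ((PySem.Dict.mk p.2).getD key []) > pvM cs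
               then ([p.1], PySem.List.len ((PySem.Dict.mk p.2).getD key []))
             else if PySem.List.len ((PySem.Dict.mk p.2).getD key []) = pvM cs
               then ((cs.filter (fun q => q.2 == pvM cs)).map (·.1) ++ [p.1], pvM cs)
             else ((cs.filter (fun q => q.2 == pvM cs)).map (·.1), pvM cs)) := by
        simp only [pvStep, if_neg hv]
      have hc : pvCnts (p :: ds) key
          = (p.1, PySem.List.len ((PySem.Dict.mk p.2).getD key [])) :: pvCnts ds key := by
        simp only [pvCnts, List.filterMap_cons, if_neg hv]
      rw [hstep, pvState_step cs p.1 (PySem.List.len ((PySem.Dict.mk p.2).getD key [])),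
        ih (cs ++ [(p.1, PySem.List.len ((PySem.Dict.mk p.2).getD key []))]), hc]
      simp [List.append_assoc]

-- ===== VERDICT (by name: the statement is the Claim_ definition above) =====
theorem find_station_area_with_most_elements_spec : Claim_equal_find_station_area_with_most_elements := by
  intro ds key _
  unfold Spec_find_station_area_with_most_elements
  rw [pvA_eq_foldl, pvB_eq]
  have h0 := pvLoop key ds []
  simp only [List.filter_nil, List.map_nil, List.nil_append] at h0
  rw [show (pvM [] : Int) = 0 from rfl] at h0
  rw [h0, pvMaxD_eq_foldl ((pvCnts ds key).map (·.2))
    (by intro x hx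
        obtain ⟨q, hq, rfl⟩ := List.mem_map.mp hx
        exact le_trans (by omega) (pvCnts_pos ds key q hq))]
  rfl
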